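-- pv_equiv track=rewrite | github.com/miliar/Code_Jam_Webscraper | solutions_python/solutions_year13_round0_nr2/666.py | solve
-- ===== SOURCE A (Python) =====
-- def solve(case):
-- 	for i in range(len(case)):
-- 		case[i] = case[i].split(' ')
--
-- 	irows = []
-- 	icols = []
--
-- 	rows = case
-- 	cols = [[case[i][j] for i in range(len(case))] for j in range(len(case[0]))]
--
-- 	for i in range(len(case)):
-- 		for j in range(len(case[i])):
-- 			if case[i][j] != max(cols[j]) and case[i][j] != max(rows[i]):
-- 				return 'NO'
-- 	return 'YES'
-- ===== SOURCE B (Python) =====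
-- def solve(case):
--     # Rebuild the grid from its row and column maxima and compare wholesale:
--     # a cell is a row-max or a col-max iff it equals min(row_max, col_max),
--     # so the grid is valid iff [[min(rm, cm)]] reproduces it exactly.
--     # Does not mutate `case`.
--     grid = [r.split(' ') for r in case]
--     rmax = [max(r) for r in grid]
--     cmax = [max(c) for c in zip(*grid)]
--     rebuilt = [[min(rm, cm) for cm in cmax] for rm in rmax]
--     return 'YES' if rebuilt == grid else 'NO'
-- ===== Notes on version B (the rewrite author's own statement) =====
-- stated objective: faster
-- what changed: B reconstructs the whole grid from its row and column maxima as [[min(row_max_i, col_max_j)]] and compares the reconstruction to the grid wholesale, instead of A's cell-by-cell scan that recomputes max(column) and max(row) for every cell; B also does not mutate its argument.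
-- outside the precondition, e.g. on solve(['b', 'a c']): A returns 'NO', B returns 'NO'
import Mathlib
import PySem

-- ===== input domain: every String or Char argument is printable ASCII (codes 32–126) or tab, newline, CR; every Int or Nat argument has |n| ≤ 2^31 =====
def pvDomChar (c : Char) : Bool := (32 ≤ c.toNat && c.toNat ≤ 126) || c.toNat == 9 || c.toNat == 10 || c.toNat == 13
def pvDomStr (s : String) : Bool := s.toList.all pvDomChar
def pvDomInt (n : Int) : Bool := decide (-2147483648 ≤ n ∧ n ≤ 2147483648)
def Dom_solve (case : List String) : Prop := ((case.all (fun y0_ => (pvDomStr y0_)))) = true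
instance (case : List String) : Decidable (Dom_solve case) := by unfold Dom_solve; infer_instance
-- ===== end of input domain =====

-- B rebuilds the grid from its row/column maxima as [[min(row_max, col_max)]] and compares the
-- reconstruction to the grid wholesale, instead of A's per-cell scan recomputing max(column)/max(row);
-- A mutates its argument (replaces each string by its split list), B does not — equality of RETURN VALUES is what is proved.

-- Python max(list-of-str), as both sources use it (never applied to [] inside Pre_)
def pyMaxS (l : List String) : String := (PySem.List.max? l (fun y => y)).getD ""

-- ===== PORT A =====
def solve (case : List String) : String :=
  let grid := case.map (fun s => (PySem.Str.split? s " ").getD [])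
  let cols := (List.range (grid.headD []).length).map
      (fun j => grid.map (fun r => r.getD j ""))
  if grid.any (fun row =>
       row.zipIdx.any (fun cj =>
         cj.1 != pyMaxS (cols.getD cj.2 []) && cj.1 != pyMaxS row))
  then "NO" else "YES"

-- ===== PORT B =====
-- zip(*grid) truncates to the shortest row; Lean's `min` on String is Python's `min(a, b)` (lexicographic, first on tie)
def solve_alt (case : List String) : String :=
  let grid := case.map (fun s => (PySem.Str.split? s " ").getD [])
  let rmax := grid.map pyMaxS
  let k := ((grid.map List.length).min?).getD 0
  let cmax := (List.range k).map (fun j => pyMaxS (grid.map (fun r => r.getD j "")))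
  let rebuilt := rmax.map (fun rm => cmax.map (fun cm => min rm cm))
  if rebuilt == grid then "YES" else "NO"

-- ===== PRECONDITION & SPEC =====
-- Pre_ excludes the empty list and ragged inputs (rows whose space-split field counts differ),
-- on which A raises IndexError either while building the column lists or mid-scan and returns
-- 'NO' only when a mismatched cell happens to precede the out-of-range access.
def Pre_solve (case : List String) : Prop :=
  case ≠ [] ∧ ∀ s ∈ case,
    ((PySem.Str.split? s " ").getD []).length
      = ((PySem.Str.split? (case.headD "") " ").getD []).length
instance (case : List String) : Decidable (Pre_solve case) := by unfold Pre_solve; infer_instance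
def pvWitness_solve : List String := ["1 2", "3 4"]
def Spec_solve (case : List String) (out : String) : Prop := out = solve_alt case
instance (case : List String) (out : String) : Decidable (Spec_solve case out) := by unfold Spec_solve; infer_instance

-- ===== CLAIM (what is proved, stated in full; the proofs are below) =====
def Claim_equal_solve : Prop := ∀ (case : List String), Dom_solve case → Pre_solve case → Spec_solve case (solve case)

-- ===== LEMMAS AND PROOFS =====

lemma getD_map_range {α : Type} (n j : Nat) (f : Nat → α) (d : α) (hj : j < n) :
    ((List.range n).map f).getD j d = f j := by
  simp [List.getD_eq_getElem?_getD, hj]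

-- the maximum of a list bounds its members
lemma le_pyMaxS {l : List String} {x : String} (hx : x ∈ l) : x ≤ pyMaxS l := by
  unfold pyMaxS
  cases hm : PySem.List.max? l (fun y => y) with
  | none => simp [(PySem.List.max?_eq_none_iff l _).mp hm] at hx
  | some m => simpa using PySem.List.max?_isMax hm x hx

-- the per-cell equivalence: for c ≤ a and c ≤ b, min a b = c ↔ (c = b ∨ c = a)
lemma min_cell {a b c : String} (ha : c ≤ a) (hb : c ≤ b) :
    min a b = c ↔ (c = b ∨ c = a) := by
  rcases le_total a b with h | h
  · rw [min_eq_left h]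
    constructor
    · intro hc; exact Or.inr hc.symm
    · rintro (rfl | rfl)
      · exact le_antisymm h ha
      · rfl
  · rw [min_eq_right h]
    constructor
    · intro hc; exact Or.inl hc.symm
    · rintro (rfl | rfl)
      · rfl
      · exact le_antisymm h hb

lemma min?_elim_const (l : List Nat) (n : Nat) (h : ∀ x ∈ l, x = n) :
    l.min?.elim n (min n) = n := by
  induction l with
  | nil => rfl
  | cons a t ih =>
    rw [List.min?_cons]
    have ha : a = n := h a (by simp)
    subst ha
    rw [Option.elim_some, ih (fun x hx => h x (by simp [hx])), min_self]

lemma if_noyes {a b : Bool} (h : a = !b) :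
    (if a = true then "NO" else "YES") = (if b = true then "YES" else "NO") := by
  subst h; cases b <;> rfl

lemma solve_eq_alt (case : List String) (hne : case ≠ [])
    (hlen : ∀ s ∈ case,
      ((PySem.Str.split? s " ").getD []).length
        = ((PySem.Str.split? (case.headD "") " ").getD []).length) :
    solve case = solve_alt case := by
  obtain ⟨c0, t, rfl⟩ : ∃ c0 t, case = c0 :: t := by
    cases case with
    | nil => exact absurd rfl hne
    | cons c0 t => exact ⟨c0, t, rfl⟩
  simp only [solve, solve_alt]
  set sp : String → List String := fun s => (PySem.Str.split? s " ").getD [] with hsp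
  set grid : List (List String) := (c0 :: t).map sp with hgrid
  set n : Nat := (grid.headD []).length with hn
  have hrow : ∀ row ∈ grid, row.length = n := by
    intro row hr
    obtain ⟨s, hs, rfl⟩ := List.mem_map.mp hr
    have := hlen s hs
    simp only [List.headD_cons] at this
    simpa [hgrid, hn, hsp] using this
  -- k = n
  have hk : ((grid.map List.length).min?).getD 0 = n := by
    have hgc : grid = sp c0 :: t.map sp := by simp [hgrid]
    rw [hgc, List.map_cons, List.min?_cons]
    have h0 : (sp c0).length = n := hrow _ (by rw [hgc]; exact List.mem_cons_self)
    rw [h0, Option.getD_some]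
    apply min?_elim_const
    intro x hx
    obtain ⟨r, hr, rfl⟩ := List.mem_map.mp hx
    exact hrow _ (by rw [hgc]; exact List.mem_cons_of_mem _ hr)
  rw [hk]
  set colF : Nat → List String := fun j => grid.map (fun r => r.getD j "") with hcolF
  -- the two indexed conditions: every cell is a col-max or row-max / every cell is min(row-max, col-max)
  have hPQ : (∀ i, ∀ _ : i < grid.length, ∀ j, ∀ _ : j < n,
        ((grid.getD i []).getD j "" = pyMaxS (colF j) ∨
         (grid.getD i []).getD j "" = pyMaxS (grid.getD i [])))
      ↔ (∀ i, ∀ _ : i < grid.length, ∀ j, ∀ _ : j < n,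
        min (pyMaxS (grid.getD i [])) (pyMaxS (colF j)) = (grid.getD i []).getD j "") := by
    have key : ∀ i (_ : i < grid.length) j (_ : j < n),
        ((grid.getD i []).getD j "" ≤ pyMaxS (grid.getD i []) ∧
         (grid.getD i []).getD j "" ≤ pyMaxS (colF j)) := by
      intro i hi j hj
      have hgi : grid.getD i [] = grid[i] := by
        simp [List.getD_eq_getElem?_getD, List.getElem?_eq_getElem hi]
      have hmem : grid[i] ∈ grid := List.getElem_mem hi
      have hjlt : j < (grid[i]).length := by rw [hrow _ hmem]; exact hj
      have hgij : (grid.getD i []).getD j "" = (grid[i])[j] := by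
        rw [hgi]
        simp [List.getD_eq_getElem?_getD, List.getElem?_eq_getElem hjlt]
      rw [hgij, hgi]
      refine ⟨le_pyMaxS (List.getElem_mem hjlt), le_pyMaxS ?_⟩
      refine List.mem_map.mpr ⟨grid[i], hmem, ?_⟩
      simp [List.getD_eq_getElem?_getD, List.getElem?_eq_getElem hjlt]
    constructor
    · intro h i hi j hj
      exact (min_cell (key i hi j hj).1 (key i hi j hj).2).mpr (h i hi j hj)
    · intro h i hi j hj
      exact (min_cell (key i hi j hj).1 (key i hi j hj).2).mp (h i hi j hj)
  -- A's scan finds no bad cell ↔ the left condition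
  have hA : (grid.any (fun row =>
        row.zipIdx.any (fun cj =>
          cj.1 != pyMaxS ((((List.range n).map colF).getD cj.2 []))
            && cj.1 != pyMaxS row)) = false)
      ↔ (∀ i, ∀ _ : i < grid.length, ∀ j, ∀ _ : j < n,
        ((grid.getD i []).getD j "" = pyMaxS (colF j) ∨
         (grid.getD i []).getD j "" = pyMaxS (grid.getD i []))) := by
    rw [List.any_eq_false]
    constructor
    · intro h i hi j hj
      have hgi : grid.getD i [] = grid[i] := by
        simp [List.getD_eq_getElem?_getD, List.getElem?_eq_getElem hi]
      have hmem : grid[i] ∈ grid := List.getElem_mem hi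
      have hrz := h _ hmem
      simp only [Bool.not_eq_true] at hrz
      rw [List.any_eq_false] at hrz
      have hjlt : j < (grid[i]).length := by rw [hrow _ hmem]; exact hj
      have hz : ((grid[i])[j], j) ∈ (grid[i]).zipIdx :=
        List.mk_mem_zipIdx_iff_getElem?.mpr (List.getElem?_eq_getElem hjlt)
      have hg := hrz _ hz
      simp only [Bool.not_eq_true, getD_map_range n j colF [] hj,
        Bool.and_eq_false_iff, bne_eq_false_iff_eq] at hg
      have hgij : (grid.getD i []).getD j "" = (grid[i])[j] := by
        rw [hgi]
        simp [List.getD_eq_getElem?_getD, List.getElem?_eq_getElem hjlt]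
      rcases hg with hg | hg
      · exact Or.inl (by rw [hgij]; exact hg)
      · exact Or.inr (by rw [hgij, hgi]; exact hg)
    · intro h row hr
      simp only [Bool.not_eq_true]
      rw [List.any_eq_false]
      rintro ⟨x, j⟩ hz
      obtain ⟨i, hi, rfl⟩ := List.mem_iff_getElem.mp hr
      have hx := List.mk_mem_zipIdx_iff_getElem?.mp hz
      have hjlt : j < (grid[i]).length := (List.getElem?_eq_some_iff.mp hx).1
      have hxv : x = (grid[i])[j] := by
        rw [List.getElem?_eq_getElem hjlt] at hx
        injection hx with h'
        exact h'.symm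
      have hjn : j < n := by rw [← hrow _ (List.getElem_mem hi)]; exact hjlt
      have hgi : grid.getD i [] = grid[i] := by
        simp [List.getD_eq_getElem?_getD, List.getElem?_eq_getElem hi]
      have hgij : (grid.getD i []).getD j "" = (grid[i])[j] := by
        rw [hgi]
        simp [List.getD_eq_getElem?_getD, List.getElem?_eq_getElem hjlt]
      have hd := h i hi j hjn
      simp only [Bool.not_eq_true, getD_map_range n j colF [] hjn,
        Bool.and_eq_false_iff, bne_eq_false_iff_eq]
      rcases hd with hd | hd
      · exact Or.inl (by rw [hxv, ← hgij, hd])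
      · exact Or.inr (by rw [hxv, ← hgij, hd, hgi])
  -- B's reconstruction equals the grid ↔ the right condition
  have hB : ((grid.map pyMaxS).map (fun rm =>
        ((List.range n).map (fun j => pyMaxS (colF j))).map (fun cm => min rm cm)) = grid)
      ↔ (∀ i, ∀ _ : i < grid.length, ∀ j, ∀ _ : j < n,
        min (pyMaxS (grid.getD i [])) (pyMaxS (colF j)) = (grid.getD i []).getD j "") := by
    constructor
    · intro h i hi j hj
      have hgi : grid.getD i [] = grid[i] := by
        simp [List.getD_eq_getElem?_getD, List.getElem?_eq_getElem hi]
      have hjlt : j < (grid[i]).length := by rw [hrow _ (List.getElem_mem hi)]; exact hj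
      have hgij : (grid.getD i []).getD j "" = (grid[i])[j] := by
        rw [hgi]
        simp [List.getD_eq_getElem?_getD, List.getElem?_eq_getElem hjlt]
      rw [hgij, hgi]
      have := congrArg (fun l => (l.getD i []).getD j "") h
      simpa [List.getD_eq_getElem?_getD, List.getElem?_eq_getElem, hi, hj, hjlt] using this
    · intro h
      apply List.ext_getElem
      · simp
      · intro i h1 h2
        apply List.ext_getElem
        · simp [hrow _ (List.getElem_mem h2)]
        · intro j hj1 hj2
          have hi : i < grid.length := h2
          have hjn : j < n := by simpa using hj1
          have hgi : grid.getD i [] = grid[i] := by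
            simp [List.getD_eq_getElem?_getD, List.getElem?_eq_getElem hi]
          have hgij : (grid.getD i []).getD j "" = (grid[i])[j] := by
            rw [hgi]
            simp [List.getD_eq_getElem?_getD, List.getElem?_eq_getElem hj2]
          have hc := h i hi j hjn
          rw [hgij, hgi] at hc
          simpa [hjn] using hc
  -- combine: A's scan flag is the negation of B's reconstruction test
  apply if_noyes
  cases hrg : ((grid.map pyMaxS).map (fun rm =>
      ((List.range n).map (fun j => pyMaxS (colF j))).map (fun cm => min rm cm)) == grid) with
  | true =>
    rw [Bool.not_true]
    exact hA.mpr (hPQ.mpr (hB.mp (beq_iff_eq.mp hrg)))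
  | false =>
    rw [Bool.not_false]
    cases hany : (grid.any (fun row =>
        row.zipIdx.any (fun cj =>
          cj.1 != pyMaxS ((((List.range n).map colF).getD cj.2 []))
            && cj.1 != pyMaxS row))) with
    | true => rfl
    | false =>
      exact absurd (hB.mpr (hPQ.mp (hA.mp hany))) (beq_eq_false_iff_ne.mp hrg)

-- ===== VERDICT (by name: the statement is the Claim_ definition above) =====
theorem solve_spec : Claim_equal_solve := by
  intro case _ hpre
  exact solve_eq_alt case hpre.1 hpre.2
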